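-- pv_equiv track=rewrite | github.com/JCelayaRdz/car-routing-optimization | metaheuristics/ga_car_routing.py | _get_next_in_parent
-- ===== SOURCE A (Python) =====
-- def _get_next_in_parent(current_node, parent, visited):
--     """
--     Busca el siguiente nodo en el padre que aún no ha sido visitado.
--     """
--     try:
--         idx = parent.index(current_node)
--         for next_node in parent[idx + 1:]:
--             if next_node not in visited:
--                 return next_node
--     except ValueError:
--         pass
--     return None
-- ===== SOURCE B (Python) =====
-- def _get_next_in_parent(current_node, parent, visited):
--     """Right-to-left pass: maintain the first unvisited node of the suffix
--     already traversed; at each occurrence of current_node the answer becomes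
--     that value (leftmost occurrence wins, matching .index)."""
--     ans = None
--     first_unvisited = None
--     for node in reversed(parent):
--         if node == current_node:
--             ans = first_unvisited
--         if node not in visited:
--             first_unvisited = node
--     return ans
-- ===== Notes on version B (the rewrite author's own statement) =====
-- stated objective: alternative
-- what changed: Replaces .index plus a forward slice scan with a single right-to-left pass (reversed(parent)) that folds a pair of accumulators: the first unvisited node of the suffix already traversed, and the answer, overwritten at each occurrence of current_node so the leftmost occurrence wins.
import Mathlib
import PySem

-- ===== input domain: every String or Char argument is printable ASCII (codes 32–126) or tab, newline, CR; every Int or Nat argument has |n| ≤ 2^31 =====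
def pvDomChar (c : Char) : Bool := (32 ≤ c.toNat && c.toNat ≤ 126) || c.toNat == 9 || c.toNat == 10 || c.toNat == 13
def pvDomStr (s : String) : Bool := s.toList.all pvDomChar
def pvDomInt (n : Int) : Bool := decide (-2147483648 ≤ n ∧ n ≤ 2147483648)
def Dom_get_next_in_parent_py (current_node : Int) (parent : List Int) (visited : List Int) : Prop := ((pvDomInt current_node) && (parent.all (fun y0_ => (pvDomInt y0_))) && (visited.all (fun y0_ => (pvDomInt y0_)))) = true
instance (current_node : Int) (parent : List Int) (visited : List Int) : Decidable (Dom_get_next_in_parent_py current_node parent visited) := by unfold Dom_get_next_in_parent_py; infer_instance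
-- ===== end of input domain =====

-- B replaces A's .index-then-forward-scan with one right-to-left pass folding a pair of accumulators (alternative decomposition, same result).


-- ===== PORT A =====
-- the 'for next_node in parent[idx+1:]' loop with its early return
def pvAScan (visited : List Int) : List Int → Option Int
  | [] => none
  | x :: xs => if x ∈ visited then pvAScan visited xs else some x

def get_next_in_parent_py (current_node : Int) (parent : List Int) (visited : List Int) : Option Int :=
  match PySem.List.index? parent current_node with
  | none => none               -- ValueError: pass, return None
  | some idx => pvAScan visited (PySem.List.slice parent (some ((idx : Int) + 1)) none)

-- ===== PORT B =====
-- body of Source B's 'for node in reversed(parent)' loop on the state (ans, first_unvisited);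
-- the reversed iteration with an accumulator pair is a right fold over parent
def pvBStep (current_node : Int) (visited : List Int) (node : Int) (st : Option Int × Option Int) : Option Int × Option Int :=
  let ans := if node = current_node then st.2 else st.1
  let fu := if node ∈ visited then st.2 else some node
  (ans, fu)

def get_next_in_parent_py_alt (current_node : Int) (parent : List Int) (visited : List Int) : Option Int :=
  (parent.foldr (pvBStep current_node visited) (none, none)).1

-- ===== PRECONDITION & SPEC =====
def Spec_get_next_in_parent_py (current_node : Int) (parent : List Int) (visited : List Int) (out : Option Int) : Prop := out = get_next_in_parent_py_alt current_node parent visited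
instance (current_node : Int) (parent : List Int) (visited : List Int) (out : Option Int) : Decidable (Spec_get_next_in_parent_py current_node parent visited out) := by unfold Spec_get_next_in_parent_py; infer_instance

-- ===== CLAIM (what is proved, stated in full; the proofs are below) =====
def Claim_equal_get_next_in_parent_py : Prop := ∀ (current_node : Int) (parent : List Int) (visited : List Int), Dom_get_next_in_parent_py current_node parent visited → Spec_get_next_in_parent_py current_node parent visited (get_next_in_parent_py current_node parent visited)

-- ===== LEMMAS AND PROOFS =====

-- the second component of B's fold is A's suffix scan (first node of the list not in visited)
theorem pvFold_snd (current_node : Int) (visited : List Int) (xs : List Int) :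
    (xs.foldr (pvBStep current_node visited) (none, none)).2 = pvAScan visited xs := by
  induction xs with
  | nil => rfl
  | cons x xs ih => simp [pvBStep, pvAScan, ih]

theorem pvMain (current_node : Int) (visited : List Int) (parent : List Int) :
    get_next_in_parent_py current_node parent visited =
      (parent.foldr (pvBStep current_node visited) (none, none)).1 := by
  induction parent with
  | nil => rfl
  | cons x xs ih =>
    by_cases hx : x = current_node
    · subst hx
      rw [get_next_in_parent_py, PySem.List.index?_cons_self]
      simp only [List.foldr_cons, pvBStep]
      rw [pvFold_snd,
        show ((0 : Nat) : Int) + 1 = ((1 : Nat) : Int) by norm_num,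
        PySem.List.slice_from_natCast]
      rfl
    · rw [get_next_in_parent_py, PySem.List.index?_cons_of_ne xs hx]
      have hb : ((x :: xs).foldr (pvBStep current_node visited) (none, none)).1 =
          (xs.foldr (pvBStep current_node visited) (none, none)).1 := by
        simp [pvBStep, hx]
      cases h : PySem.List.index? xs current_node with
      | none =>
        simp only [Option.map_none]
        rw [hb, ← ih, get_next_in_parent_py, h]
      | some k =>
        simp only [Option.map_some]
        rw [hb, ← ih, get_next_in_parent_py, h]
        simp only []
        rw [show ((k : Nat) : Int) + 1 = ((k + 1 : Nat) : Int) by push_cast; ring,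
          show ((k + 1 : Nat) : Int) + 1 = ((k + 2 : Nat) : Int) by push_cast; ring,
          PySem.List.slice_from_natCast, PySem.List.slice_from_natCast]
        simp

-- ===== VERDICT (by name: the statement is the Claim_ definition above) =====
theorem get_next_in_parent_py_spec : Claim_equal_get_next_in_parent_py := by
  intro c p v _
  unfold Spec_get_next_in_parent_py get_next_in_parent_py_alt
  exact pvMain c v p
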